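-- pv_equiv track=rewrite | github.com/DanieduUSB/verano2024 | tarea1.py | SonAmigos
-- ===== SOURCE A (Python) =====
-- def SonAmigos(x, y):
--
--     divisoresx = []
--
--     for i in range(1,x+1):
--         if x % i == 0:
--             divisoresx.append(i)
--
--     divisoresy = []
--
--     for i in range(1,y+1):
--         if y % i == 0:
--             divisoresy.append(i)
--
--     if sum(divisoresx) == sum(divisoresy):
--         return True
--     else:
--         return False
-- ===== SOURCE B (Python) =====
-- def SonAmigos(x, y):
--     def divisor_sum(n):
--         total = 0
--         i = 1
--         while i * i <= n:
--             if n % i == 0: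
--                 total += i
--                 j = n // i
--                 if j != i:
--                     total += j
--             i += 1
--         return total
--     return divisor_sum(x) == divisor_sum(y)
-- ===== Notes on version B (the rewrite author's own statement) =====
-- stated objective: faster
-- what changed: Replaces the full 1..n trial-division scan with a sqrt(n) loop that pairs each small divisor i with its cofactor n//i, summing both at once.
import Mathlib
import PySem

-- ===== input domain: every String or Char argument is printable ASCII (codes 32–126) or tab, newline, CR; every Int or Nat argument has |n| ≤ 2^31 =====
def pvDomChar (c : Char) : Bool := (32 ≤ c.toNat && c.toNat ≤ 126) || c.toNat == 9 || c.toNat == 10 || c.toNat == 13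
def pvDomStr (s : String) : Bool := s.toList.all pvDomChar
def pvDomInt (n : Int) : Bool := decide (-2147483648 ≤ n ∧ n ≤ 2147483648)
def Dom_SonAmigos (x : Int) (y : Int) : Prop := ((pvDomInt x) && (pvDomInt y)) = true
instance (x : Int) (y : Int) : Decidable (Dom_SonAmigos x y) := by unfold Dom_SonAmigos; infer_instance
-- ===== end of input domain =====

-- B replaces A's full 1..n trial-division scan by a sqrt(n) loop pairing each small
-- divisor i with its cofactor n//i (objective: faster, asymptotically).

-- ===== PORT A =====
def SonAmigos (x : Int) (y : Int) : Bool :=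
  let divisoresx := (PySem.List.pyRange 1 (x + 1) 1).foldl
    (fun acc i => if PySem.Int.mod x i = 0 then acc ++ [i] else acc) []
  let divisoresy := (PySem.List.pyRange 1 (y + 1) 1).foldl
    (fun acc i => if PySem.Int.mod y i = 0 then acc ++ [i] else acc) []
  if divisoresx.sum = divisoresy.sum then true else false

-- ===== PORT B =====
-- while i*i <= n loop of Source B's divisor_sum
def pvDivSumLoop (n : Int) (i : Int) (total : Int) : Int :=
  if h : i * i ≤ n then
    pvDivSumLoop n (i + 1)
      (if PySem.Int.mod n i = 0 then
        (let j := PySem.Int.floordiv n i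
         if j ≠ i then total + i + j else total + i)
       else total)
  else total
termination_by (n + 1 - i).toNat
decreasing_by
  have hin : i ≤ n := by nlinarith [mul_self_nonneg i, mul_self_nonneg (i - 1)]
  omega

def SonAmigos_alt (x : Int) (y : Int) : Bool :=
  pvDivSumLoop x 1 0 == pvDivSumLoop y 1 0

-- ===== PRECONDITION & SPEC =====
def Spec_SonAmigos (x : Int) (y : Int) (out : Bool) : Prop := out = SonAmigos_alt x y
instance (x : Int) (y : Int) (out : Bool) : Decidable (Spec_SonAmigos x y out) := by unfold Spec_SonAmigos; infer_instance

-- ===== CLAIM (what is proved, stated in full; the proofs are below) =====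
def Claim_equal_SonAmigos : Prop := ∀ (x : Int) (y : Int), Dom_SonAmigos x y → Spec_SonAmigos x y (SonAmigos x y)

-- ===== LEMMAS AND PROOFS =====

def pvDSum (m : Nat) : Int := ∑ d ∈ m.divisors, (d : Int)

lemma pvA_partial (n : Int) (k : Nat) (hk : (k : Int) ≤ n) :
    ((PySem.List.pyRange 1 ((k : Int) + 1) 1).filter (fun i => PySem.Int.mod n i = 0)).sum
      = ∑ d ∈ n.toNat.divisors.filter (· ≤ k), (d : Int) := by
  induction k with
  | zero =>
      rw [PySem.List.pyRange_one_eq_nil (by norm_num)]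
      rw [Finset.filter_false_of_mem]
      · simp
      · intro d hd
        have := Nat.pos_of_mem_divisors hd
        omega
  | succ k ih =>
      have hk' : (k : Int) ≤ n := by push_cast at hk ⊢; omega
      have hrange : PySem.List.pyRange 1 ((k:Int) + 1 + 1) 1
          = PySem.List.pyRange 1 ((k:Int) + 1) 1 ++ [(k:Int) + 1] := by
        exact PySem.List.pyRange_one_succ_right (by omega)
      have hkcast : ((k + 1 : Nat) : Int) + 1 = (k:Int) + 1 + 1 := by push_cast; ring
      rw [hkcast, hrange, List.filter_append, List.sum_append, ih hk']
      have hdvd : (PySem.Int.mod n ((k:Int)+1) = 0) ↔ ((k+1) ∣ n.toNat) := by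
        rw [PySem.Int.mod_eq_zero_iff_dvd]
        have hn : n = (n.toNat : Int) := by omega
        constructor
        · intro hd; rw [hn] at hd
          exact_mod_cast (Int.natCast_dvd_natCast (m := k+1) (n := n.toNat)).mp (by exact_mod_cast hd)
        · intro hd; rw [hn]; exact_mod_cast Int.natCast_dvd_natCast.mpr hd
      have hsplit : n.toNat.divisors.filter (· ≤ k + 1)
          = if (k+1) ∣ n.toNat then insert (k+1) (n.toNat.divisors.filter (· ≤ k))
            else n.toNat.divisors.filter (· ≤ k) := by
        split_ifs with hd
        · ext d
          simp only [Finset.mem_filter, Finset.mem_insert, Nat.mem_divisors]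
          constructor
          · rintro ⟨⟨hdd, hne⟩, hle⟩
            rcases Nat.eq_or_lt_of_le hle with h | h
            · left; omega
            · right; exact ⟨⟨hdd, hne⟩, by omega⟩
          · rintro (rfl | ⟨⟨hdd, hne⟩, hle⟩)
            · refine ⟨⟨hd, by omega⟩, le_refl _⟩
            · exact ⟨⟨hdd, hne⟩, by omega⟩
        · ext d
          simp only [Finset.mem_filter, Nat.mem_divisors]
          constructor
          · rintro ⟨⟨hdd, hne⟩, hle⟩
            rcases Nat.eq_or_lt_of_le hle with h | h
            · exact absurd (h ▸ hdd) hd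
            · exact ⟨⟨hdd, hne⟩, by omega⟩
          · rintro ⟨⟨hdd, hne⟩, hle⟩; exact ⟨⟨hdd, hne⟩, by omega⟩
      by_cases hd : (k+1) ∣ n.toNat
      · rw [hsplit, if_pos hd, Finset.sum_insert (by simp)]
        have hm : PySem.Int.mod n ((k:Int)+1) = 0 := hdvd.mpr hd
        simp only [List.filter_singleton, hm, decide_true, cond_true, List.sum_cons, List.sum_nil]
        push_cast
        ring
      · rw [hsplit, if_neg hd]
        have hm : ¬ PySem.Int.mod n ((k:Int)+1) = 0 := fun h => hd (hdvd.mp h)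
        simp only [List.filter_singleton, hm, decide_false, cond_false, List.sum_nil, add_zero]

lemma pvA_sum (n : Int) :
    ((PySem.List.pyRange 1 (n + 1) 1).foldl
      (fun acc i => if PySem.Int.mod n i = 0 then acc ++ [i] else acc) []).sum = pvDSum n.toNat := by
  rw [PySem.List.foldl_append_ite_eq_filter]
  rcases le_or_gt n 0 with hn | hn
  · rw [PySem.List.pyRange_one_eq_nil (by omega)]
    have : n.toNat = 0 := by omega
    simp [this, pvDSum]
  · have hcast : n + 1 = (n.toNat : Int) + 1 := by omega
    rw [List.nil_append, hcast, pvA_partial n n.toNat (by omega)]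
    rw [Finset.filter_true_of_mem (fun d hd => Nat.divisor_le hd)]
    rfl

lemma pvSmallBig (m : Nat) {a : Nat} (ha : a ∈ (m.divisors.filter (fun d => d * d ≤ m)).filter (fun d => m / d ≠ d)) :
    m / a ∈ m.divisors.filter (fun d => ¬ d * d ≤ m) := by
  simp only [Finset.mem_filter, Nat.mem_divisors] at ha ⊢
  obtain ⟨⟨⟨hdvd, hm⟩, haa⟩, hne⟩ := ha
  have hapos : 0 < a := Nat.pos_of_dvd_of_pos hdvd (Nat.pos_of_ne_zero hm)
  obtain ⟨c, hc⟩ := hdvd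
  have hca : m / a = c := by rw [hc, Nat.mul_div_cancel_left _ hapos]
  have hcpos : 0 < c := by rcases Nat.eq_zero_or_pos c with h | h; · simp [h] at hc; omega
                           · exact h
  have hac : a < c := by
    have h1 : a ≤ c := by
      have := haa; rw [hc] at this; exact Nat.le_of_mul_le_mul_left this hapos
    rcases Nat.eq_or_lt_of_le h1 with h | h
    · exact absurd (hca.trans h.symm) hne
    · exact h
  refine ⟨⟨⟨a, by rw [hca, hc]; ring⟩, hm⟩, ?_⟩
  rw [hca, hc]
  intro hcc
  nlinarith

lemma pvBigSmall (m : Nat) {b : Nat} (hb : b ∈ m.divisors.filter (fun d => ¬ d * d ≤ m)) :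
    m / b ∈ (m.divisors.filter (fun d => d * d ≤ m)).filter (fun d => m / d ≠ d) := by
  simp only [Finset.mem_filter, Nat.mem_divisors] at hb ⊢
  obtain ⟨⟨hdvd, hm⟩, hbb⟩ := hb
  have hbpos : 0 < b := Nat.pos_of_dvd_of_pos hdvd (Nat.pos_of_ne_zero hm)
  obtain ⟨c, hc⟩ := hdvd
  have hcb : m / b = c := by rw [hc, Nat.mul_div_cancel_left _ hbpos]
  have hcltb : c < b := by nlinarith [Nat.le_of_not_lt (fun h : b < c => hbb (by nlinarith))]
  have hmc : m / (m / b) = b := Nat.div_div_self ⟨c, hc⟩ hm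
  refine ⟨⟨⟨⟨b, by rw [hcb, hc]; ring⟩, hm⟩, ?_⟩, ?_⟩
  · rw [hcb]; nlinarith
  · rw [hmc, hcb]; omega

lemma pvPairing (m : Nat) :
    (∑ d ∈ m.divisors.filter (fun d => d * d ≤ m),
       ((d : Int) + if m / d ≠ d then ((m / d : Nat) : Int) else 0)) = pvDSum m := by
  unfold pvDSum
  rw [← Finset.sum_filter_add_sum_filter_not m.divisors (fun d => d * d ≤ m) (fun d => (d : Int))]
  rw [Finset.sum_add_distrib]
  congr 1
  rw [← Finset.sum_filter]
  refine Finset.sum_nbij' (i := fun d => m / d) (j := fun d => m / d)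
    (fun a ha => pvSmallBig m ha) (fun b hb => pvBigSmall m hb) ?_ ?_ ?_
  · intro a ha
    simp only [Finset.mem_filter, Nat.mem_divisors] at ha
    exact Nat.div_div_self ha.1.1.1 ha.1.1.2
  · intro b hb
    simp only [Finset.mem_filter, Nat.mem_divisors] at hb
    exact Nat.div_div_self hb.1.1 hb.1.2
  · intro a _; rfl

lemma pvB_loop (n : Int) (i : Int) (total : Int) :
    1 ≤ i → pvDivSumLoop n i total
      = total + ∑ d ∈ n.toNat.divisors.filter (fun d => i.toNat ≤ d ∧ d * d ≤ n.toNat),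
          ((d : Int) + if n.toNat / d ≠ d then ((n.toNat / d : Nat) : Int) else 0) := by
  induction i, total using pvDivSumLoop.induct n with
  | case1 i total h ih =>
      intro hi
      rw [pvDivSumLoop, dif_pos h]
      simp only [dite_eq_ite] at ih
      rw [ih (by omega)]
      have hn1 : 1 ≤ n := by nlinarith
      have hn0 : 0 ≤ n := by omega
      set m := n.toNat with hm
      set d0 := i.toNat with hd0
      have hieq : (d0 : Int) = i := by omega
      have hneq : (m : Int) = n := by omega
      have hd01 : 1 ≤ d0 := by omega
      have hm1 : 1 ≤ m := by omega
      have hsq : d0 * d0 ≤ m := by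
        have h' : ((d0 * d0 : Nat) : Int) ≤ n := by push_cast [hieq]; exact h
        omega
      have hi1 : (i + 1).toNat = d0 + 1 := by omega
      have hdvd_iff : PySem.Int.mod n i = 0 ↔ d0 ∣ m := by
        rw [PySem.Int.mod_eq_zero_iff_dvd, ← hieq, ← hneq]
        exact Int.natCast_dvd_natCast
      by_cases hd : d0 ∣ m
      · have hmod : PySem.Int.mod n i = 0 := hdvd_iff.mpr hd
        have hfd : PySem.Int.floordiv n i = ((m / d0 : Nat) : Int) := by
          rw [← hieq, ← hneq]; exact PySem.Int.floordiv_natCast m d0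
        have hmem : d0 ∈ m.divisors := Nat.mem_divisors.mpr ⟨hd, by omega⟩
        have hsplit : m.divisors.filter (fun d => d0 ≤ d ∧ d * d ≤ m)
            = insert d0 (m.divisors.filter (fun d => d0 + 1 ≤ d ∧ d * d ≤ m)) := by
          ext d
          simp only [Finset.mem_filter, Finset.mem_insert]
          constructor
          · rintro ⟨hdm, hle, hsq'⟩
            rcases Nat.eq_or_lt_of_le hle with h' | h'
            · exact Or.inl h'.symm
            · exact Or.inr ⟨hdm, by omega, hsq'⟩
          · rintro (rfl | ⟨hdm, hle, hsq'⟩)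
            · exact ⟨hmem, le_refl _, hsq⟩
            · exact ⟨hdm, by omega, hsq'⟩
        rw [hi1, hsplit, Finset.sum_insert (by simp), if_pos hmod, hfd, ← hieq]
        by_cases hne : m / d0 ≠ d0
        · rw [if_pos (show ((m / d0 : Nat) : Int) ≠ (d0 : Int) from by exact_mod_cast hne),
              if_pos hne]
          ring
        · push_neg at hne
          rw [if_neg (not_ne_iff.mpr (show ((m / d0 : Nat) : Int) = (d0 : Int) from by exact_mod_cast hne)),
              if_neg (by omega)]
          ring
      · have hmod : ¬ PySem.Int.mod n i = 0 := fun h' => hd (hdvd_iff.mp h')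
        have hsame : m.divisors.filter (fun d => d0 ≤ d ∧ d * d ≤ m)
            = m.divisors.filter (fun d => d0 + 1 ≤ d ∧ d * d ≤ m) := by
          ext d
          simp only [Finset.mem_filter]
          constructor
          · rintro ⟨hdm, hle, hsq'⟩
            rcases Nat.eq_or_lt_of_le hle with h' | h'
            · exact absurd (h' ▸ (Nat.mem_divisors.mp hdm).1) hd
            · exact ⟨hdm, by omega, hsq'⟩
          · rintro ⟨hdm, hle, hsq'⟩; exact ⟨hdm, by omega, hsq'⟩
        rw [hi1, hsame, if_neg hmod]
  | case2 i total h =>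
      intro hi
      rw [pvDivSumLoop, dif_neg h]
      rw [Finset.filter_false_of_mem, Finset.sum_empty, add_zero]
      rintro d hd ⟨hle, hsq⟩
      have hdvd := Nat.mem_divisors.mp hd
      have hn0 : 0 ≤ n := by
        rcases le_or_gt 0 n with h' | h'
        · exact h'
        · exfalso; have : n.toNat = 0 := by omega
          rw [this] at hd; simp at hd
      have hilt : n < i * i := by omega
      have : n.toNat < i.toNat * i.toNat := by
        have h2 : (n : Int) < ((i.toNat * i.toNat : Nat) : Int) := by
          push_cast [show ((i.toNat : Int)) = i by omega]; exact hilt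
        omega
      have hdd : i.toNat * i.toNat ≤ d * d := Nat.mul_le_mul hle hle
      omega

lemma pvB_sum (n : Int) : pvDivSumLoop n 1 0 = pvDSum n.toNat := by
  rw [pvB_loop n 1 0 (by norm_num), zero_add]
  rw [show (n.toNat.divisors.filter (fun d => (1:Int).toNat ≤ d ∧ d * d ≤ n.toNat))
        = n.toNat.divisors.filter (fun d => d * d ≤ n.toNat) from
      Finset.filter_congr fun d hd => by
        have := Nat.pos_of_mem_divisors hd
        simp
        omega]
  exact pvPairing n.toNat

-- ===== VERDICT (by name: the statement is the Claim_ definition above) =====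
theorem SonAmigos_spec : Claim_equal_SonAmigos := by
  intro x y _
  unfold Spec_SonAmigos SonAmigos SonAmigos_alt
  simp only [pvA_sum, pvB_sum]
  by_cases h : pvDSum x.toNat = pvDSum y.toNat <;> simp [h]
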